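-- pv_equiv track=rewrite | github.com/cceh/ntg | scripts/cceh/ntg_plot.py | passages_labels
-- ===== SOURCE A (Python) =====
-- def passages_labels (passages):
--     """Build ticks and labels for passages axis.
--
--     Use one tick every verse.
--
--     """
--
--     def group_by (s):
--         return s[:3]
--
--     def title (s):
--         return s[1:3]
--
--     group = None
--     ticks = []
--     labels = []
--
--     for i, passage in enumerate (passages):
--         g = group_by (passage)
--         if g != group:
--             ticks.append (i)
--             labels.append (title (passage))
--             group = g
--
--     return ticks, labels
-- ===== SOURCE B (Python) =====
-- def passages_labels(passages):
--     """Build ticks and labels for passages axis.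
--
--     Group-based: split the enumerated passages into maximal runs of
--     consecutive items sharing the group key s[:3]; each run contributes
--     its first item's index as a tick and that passage's [1:3] as a label.
--     """
--     items = list(enumerate(passages))
--     n = len(items)
--     groups = []
--     i = 0
--     while i < n:
--         key = items[i][1][:3]
--         j = i + 1
--         while j < n and items[j][1][:3] == key:
--             j += 1
--         groups.append(items[i:j])
--         i = j
--     return [g[0][0] for g in groups], [g[0][1][1:3] for g in groups]
-- ===== Notes on version B (the rewrite author's own statement) =====
-- stated objective: alternative
-- what changed: A's None-sentinel state machine (one pass comparing each passage's key to the previous group) is replaced by an explicit grouping algorithm: recursively split the enumerated list into maximal consecutive runs with equal key s[:3], then map each run to its first element's index and label.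
import Mathlib
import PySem

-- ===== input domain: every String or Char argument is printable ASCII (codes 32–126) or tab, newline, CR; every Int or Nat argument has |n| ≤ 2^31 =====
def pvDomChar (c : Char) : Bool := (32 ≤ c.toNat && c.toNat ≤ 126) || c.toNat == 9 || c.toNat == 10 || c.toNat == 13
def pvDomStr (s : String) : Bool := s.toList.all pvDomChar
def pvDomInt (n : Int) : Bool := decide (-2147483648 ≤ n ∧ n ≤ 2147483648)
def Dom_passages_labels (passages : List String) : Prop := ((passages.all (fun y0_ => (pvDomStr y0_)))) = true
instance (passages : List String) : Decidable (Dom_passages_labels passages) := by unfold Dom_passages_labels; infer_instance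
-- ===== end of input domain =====

-- B replaces A's None-sentinel state machine by an explicit grouping algorithm:
-- split the enumerated list into maximal consecutive runs of equal key s[:3],
-- then map each run to its first element; objective: alternative (same cost).

-- ===== PORT A =====
-- A: fold over enumerate(passages) carrying (group : Option String, ticks, labels);
-- group starts as None, hence Option String; 'g != group' is 'some g ≠ group'.
def passages_labels (passages : List String) : List Int × List String :=
  let st := (PySem.List.enumerate passages 0).foldl
    (fun (st : Option String × List Int × List String) ip =>
      let g := PySem.Str.slice ip.2 none (some 3)
      if some g ≠ st.1 then
        (some g, st.2.1 ++ [ip.1], st.2.2 ++ [PySem.Str.slice ip.2 (some 1) (some 3)])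
      else st)
    (none, [], [])
  (st.2.1, st.2.2)

-- ===== PORT B =====
-- B's grouping loop: each outer iteration peels off the maximal run sharing the
-- current first item's key (the inner j-scan is the takeWhile/dropWhile split of
-- the tail) and continues on the remainder; ported as the equivalent recursion.
def pvSplitGroups : List (Int × String) → List (List (Int × String))
  | [] => []
  | x :: xs =>
    let key := PySem.Str.slice x.2 none (some 3)
    let grp := xs.takeWhile (fun y => PySem.Str.slice y.2 none (some 3) == key)
    let rest := xs.dropWhile (fun y => PySem.Str.slice y.2 none (some 3) == key)
    (x :: grp) :: pvSplitGroups rest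
termination_by l => l.length
decreasing_by
  have := List.length_dropWhile_le (fun y => PySem.Str.slice y.2 none (some 3) == PySem.Str.slice x.2 none (some 3)) xs
  simp; omega

-- B: groups over enumerate(passages); return firsts' indices and labels
-- (g[0] on a nonempty group, ported as headD with an unused default).
def passages_labels_alt (passages : List String) : List Int × List String :=
  let groups := pvSplitGroups (PySem.List.enumerate passages 0)
  (groups.map (fun g => (g.headD (0, "")).1),
   groups.map (fun g => PySem.Str.slice (g.headD (0, "")).2 (some 1) (some 3)))

-- ===== PRECONDITION & SPEC =====
def Spec_passages_labels (passages : List String) (out : List Int × List String) : Prop := out = passages_labels_alt passages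
instance (passages : List String) (out : List Int × List String) : Decidable (Spec_passages_labels passages out) := by unfold Spec_passages_labels; infer_instance

-- ===== CLAIM (what is proved, stated in full; the proofs are below) =====
def Claim_equal_passages_labels : Prop := ∀ (passages : List String), Dom_passages_labels passages → Spec_passages_labels passages (passages_labels passages)

-- ===== LEMMAS AND PROOFS =====

-- the loop body of port A, named for the lemmas
def pvStepA (st : Option String × List Int × List String) (ip : Int × String) :
    Option String × List Int × List String :=
  let g := PySem.Str.slice ip.2 none (some 3)
  if some g ≠ st.1 then
    (some g, st.2.1 ++ [ip.1], st.2.2 ++ [PySem.Str.slice ip.2 (some 1) (some 3)])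
  else st

theorem pvA_eq (passages : List String) :
    passages_labels passages
    = (((PySem.List.enumerate passages 0).foldl pvStepA (none, [], [])).2.1,
       ((PySem.List.enumerate passages 0).foldl pvStepA (none, [], [])).2.2) := rfl

-- recursive characterisation of A's fold over a list of enumerated pairs
def pvLoopE : List (Int × String) → Option String → List Int × List String
  | [], _ => ([], [])
  | x :: xs, g =>
    let k := PySem.Str.slice x.2 none (some 3)
    if some k ≠ g then
      let r := pvLoopE xs (some k)
      (x.1 :: r.1, PySem.Str.slice x.2 (some 1) (some 3) :: r.2)
    else pvLoopE xs g

theorem pvA_loop (L : List (Int × String)) (g : Option String)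
    (t : List Int) (l : List String) :
    (L.foldl pvStepA (g, t, l)).2
    = (t ++ (pvLoopE L g).1, l ++ (pvLoopE L g).2) := by
  induction L generalizing g t l with
  | nil => simp [pvLoopE]
  | cons x xs ih =>
    by_cases h : some (PySem.Str.slice x.2 none (some 3)) = g
    · have h1 : pvStepA (g, t, l) x = (g, t, l) := by simp [pvStepA, h]
      have h2 : pvLoopE (x :: xs) g = pvLoopE xs g := by simp [pvLoopE, h]
      simp only [List.foldl_cons, h1, h2]
      exact ih g t l
    · have h1 : pvStepA (g, t, l) x
          = (some (PySem.Str.slice x.2 none (some 3)), t ++ [x.1],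
             l ++ [PySem.Str.slice x.2 (some 1) (some 3)]) := by simp [pvStepA, h]
      have h2 : pvLoopE (x :: xs) g
          = (x.1 :: (pvLoopE xs (some (PySem.Str.slice x.2 none (some 3)))).1,
             PySem.Str.slice x.2 (some 1) (some 3) ::
               (pvLoopE xs (some (PySem.Str.slice x.2 none (some 3)))).2) := by
        simp [pvLoopE, h]
      simp only [List.foldl_cons, h1, h2]
      rw [ih (some (PySem.Str.slice x.2 none (some 3)))
            (t ++ [x.1]) (l ++ [PySem.Str.slice x.2 (some 1) (some 3)])]
      simp

-- elements whose key equals the current group are skipped by A's loop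
theorem pvLoopE_skip (t r : List (Int × String)) (k : String)
    (h : ∀ y ∈ t, PySem.Str.slice y.2 none (some 3) = k) :
    pvLoopE (t ++ r) (some k) = pvLoopE r (some k) := by
  induction t with
  | nil => rfl
  | cons y ys ih =>
    have hy : PySem.Str.slice y.2 none (some 3) = k := h y (List.mem_cons_self)
    simp only [List.cons_append]
    rw [show pvLoopE (y :: (ys ++ r)) (some k) = pvLoopE (ys ++ r) (some k) by
      simp [pvLoopE, hy]]
    exact ih (fun z hz => h z (List.mem_cons_of_mem _ hz))

-- a mismatching previous group behaves like no previous group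
theorem pvLoopE_fresh (r : List (Int × String)) (k : String)
    (h : ∀ y ∈ r.head?, PySem.Str.slice y.2 none (some 3) ≠ k) :
    pvLoopE r (some k) = pvLoopE r none := by
  cases r with
  | nil => rfl
  | cons y ys =>
    have hy := h y (by simp)
    simp [pvLoopE, hy]

-- the grouped output equals A's loop with no previous group
theorem pvB_loop (L : List (Int × String)) :
    ((pvSplitGroups L).map (fun g => (g.headD (0, "")).1),
     (pvSplitGroups L).map (fun g => PySem.Str.slice (g.headD (0, "")).2 (some 1) (some 3)))
    = pvLoopE L none := by
  induction L using pvSplitGroups.induct with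
  | case1 => simp [pvSplitGroups, pvLoopE]
  | case2 x xs key rest ih =>
    set grp := xs.takeWhile (fun y => PySem.Str.slice y.2 none (some 3) == key) with hgrp
    rw [show pvSplitGroups (x :: xs) = (x :: grp) :: pvSplitGroups rest from by
      rw [pvSplitGroups]]
    have hxs : xs = grp ++ rest := (List.takeWhile_append_dropWhile).symm
    have h1 : pvLoopE (x :: xs) none
        = (x.1 :: (pvLoopE xs (some key)).1,
           PySem.Str.slice x.2 (some 1) (some 3) :: (pvLoopE xs (some key)).2) := by
      simp [pvLoopE, key]
    have h2 : pvLoopE xs (some key) = pvLoopE rest (some key) := by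
      rw [hxs]
      exact pvLoopE_skip grp rest key (fun y hy => by
        have := List.mem_takeWhile_imp hy
        simpa using this)
    have h3 : pvLoopE rest (some key) = pvLoopE rest none := by
      apply pvLoopE_fresh
      intro y hy
      have := List.head?_dropWhile_not (fun y => PySem.Str.slice y.2 none (some 3) == key) xs
      cases hr : rest.head? with
      | none => simp [hr] at hy
      | some z =>
        simp only [hr, Option.mem_def, Option.some.injEq] at hy
        subst hy
        rw [show xs.dropWhile (fun y => PySem.Str.slice y.2 none (some 3) == key) = rest from rfl, hr] at this
        simpa using this
    rw [h1, h2, h3, ← ih]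
    simp

-- ===== VERDICT (by name: the statement is the Claim_ definition above) =====
theorem passages_labels_spec : Claim_equal_passages_labels := by
  intro passages _
  unfold Spec_passages_labels passages_labels_alt
  rw [pvA_eq passages, pvA_loop (PySem.List.enumerate passages 0) none [] []]
  simp only [List.nil_append]
  exact (pvB_loop (PySem.List.enumerate passages 0)).symm
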